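-- pv_equiv track=rewrite | github.com/toane/Congruence | utils/Wordcount_methods.py | global_wordcount
-- ===== SOURCE A (Python) =====
-- from itertools import groupby, chain
--
-- def global_wordcount(wordcounts):
--     """
--     aggregates a list of wordcounts into a single
--     wordcount
--     """
--
--     chained = []
--     for article in wordcounts:
--         for item in article:
--             chained.append(item)
--     grouped = groupby(sorted(chained), key=lambda item: item[0])
--     res = map(lambda item: (item[0], sum(map(lambda it: it[1], item[1]))), grouped)
--     return list(res)
-- ===== SOURCE B (Python) =====
-- def global_wordcount(wordcounts):
--     """aggregates a list of wordcounts into a single wordcount"""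
--     totals = {}
--     for article in wordcounts:
--         for word, count in article:
--             totals[word] = totals.get(word, 0) + count
--     return sorted(totals.items())
-- ===== Notes on version B (the rewrite author's own statement) =====
-- stated objective: faster
-- what changed: replaced flatten + sort-all-pairs + itertools.groupby with a single-pass dict aggregation followed by sorting only the unique words
import Mathlib
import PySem

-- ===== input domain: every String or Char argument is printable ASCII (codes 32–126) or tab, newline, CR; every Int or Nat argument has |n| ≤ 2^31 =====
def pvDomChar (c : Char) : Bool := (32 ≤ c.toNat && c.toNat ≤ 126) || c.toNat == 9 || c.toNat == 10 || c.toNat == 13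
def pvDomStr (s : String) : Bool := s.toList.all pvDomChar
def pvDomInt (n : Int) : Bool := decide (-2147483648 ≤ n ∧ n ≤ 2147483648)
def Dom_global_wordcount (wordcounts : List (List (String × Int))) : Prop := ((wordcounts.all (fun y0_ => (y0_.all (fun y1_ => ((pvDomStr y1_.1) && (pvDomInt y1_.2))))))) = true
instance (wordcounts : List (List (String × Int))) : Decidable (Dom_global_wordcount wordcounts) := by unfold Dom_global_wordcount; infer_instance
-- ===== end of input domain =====

-- B replaces A's flatten + sort-all-pairs + itertools.groupby with a one-pass dict aggregation
-- followed by sorting only the unique words' items (objective: faster).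

-- ===== PORT A =====
-- itertools.groupby(l, key=lambda item: item[0]): consecutive runs of ==-equal keys, each group materialised
def pyGroupby (l : List (String × Int)) : List (String × List (String × Int)) :=
  match l with
  | [] => []
  | x :: xs =>
      (x.1, x :: xs.takeWhile (fun p => p.1 == x.1)) :: pyGroupby (xs.dropWhile (fun p => p.1 == x.1))
termination_by l.length
decreasing_by
  simp only [List.length_cons]
  have := (List.dropWhile_sublist (l := xs) (p := fun p => p.1 == x.1)).length_le
  omega

def global_wordcount (wordcounts : List (List (String × Int))) : List (String × Int) :=
  let chained := wordcounts.foldl (fun c article => article.foldl (fun c item => c ++ [item]) c) []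
  let grouped := pyGroupby (PySem.List.sorted2 chained (fun p => p.1) (fun p => p.2))
  grouped.map (fun g => (g.1, (g.2.map (fun it => it.2)).sum))

-- ===== PORT B =====
def global_wordcount_alt (wordcounts : List (List (String × Int))) : List (String × Int) :=
  -- totals[word] = totals.get(word, 0) + count  ==  modify word 0 (· + count)
  let totals := wordcounts.foldl
    (fun d article => article.foldl (fun d wc => d.modify wc.1 0 (fun v => v + wc.2)) d)
    (PySem.Dict.empty : PySem.Dict String Int)
  PySem.List.sorted2 totals.items (fun p => p.1) (fun p => p.2)

-- ===== PRECONDITION & SPEC =====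
def Spec_global_wordcount (wordcounts : List (List (String × Int))) (out : List (String × Int)) : Prop := out = global_wordcount_alt wordcounts
instance (wordcounts : List (List (String × Int))) (out : List (String × Int)) : Decidable (Spec_global_wordcount wordcounts out) := by unfold Spec_global_wordcount; infer_instance

-- ===== CLAIM (what is proved, stated in full; the proofs are below) =====
def Claim_equal_global_wordcount : Prop := ∀ (wordcounts : List (List (String × Int))), Dom_global_wordcount wordcounts → Spec_global_wordcount wordcounts (global_wordcount wordcounts)

-- ===== LEMMAS AND PROOFS =====

-- total count of word w in a flat wordcount list
def keyTotal (xs : List (String × Int)) (w : String) : Int :=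
  ((xs.filter (fun p => p.1 == w)).map (fun p => p.2)).sum

-- the canonical aggregate both ports are proved equal to
def canon (xs : List (String × Int)) : List (String × Int) :=
  (PySem.List.sorted (PySem.Set.ofList (xs.map (fun p => p.1))) (fun w => w)).map
    (fun w => (w, keyTotal xs w))

lemma chained_eq_flatten (wordcounts : List (List (String × Int))) :
    wordcounts.foldl (fun c article => article.foldl (fun c item => c ++ [item]) c) [] =
      wordcounts.flatten := by
  have aux : ∀ (L : List (List (String × Int))) (acc : List (String × Int)),
      L.foldl (fun c article => article.foldl (fun c item => c ++ [item]) c) acc =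
        acc ++ L.flatten := by
    intro L
    induction L with
    | nil => simp
    | cons a L ih =>
        intro acc
        rw [List.foldl_cons, PySem.List.foldl_append_singleton, ih, List.flatten_cons,
          List.append_assoc]
  simpa using aux wordcounts []

lemma keyTotal_perm {xs ys : List (String × Int)} (h : xs.Perm ys) (w : String) :
    keyTotal xs w = keyTotal ys w := by
  unfold keyTotal
  exact ((h.filter _).map _).sum_eq

lemma keyTotal_cons (x : String × Int) (l : List (String × Int)) (w : String) :
    keyTotal (x :: l) w = (if x.1 = w then x.2 else 0) + keyTotal l w := by
  simp only [keyTotal, List.filter_cons]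
  split_ifs with h <;> simp_all

lemma keyTotal_append (l₁ l₂ : List (String × Int)) (w : String) :
    keyTotal (l₁ ++ l₂) w = keyTotal l₁ w + keyTotal l₂ w := by
  simp [keyTotal, List.filter_append]

lemma keyTotal_eq_zero {l : List (String × Int)} {w : String} (h : ∀ p ∈ l, p.1 ≠ w) :
    keyTotal l w = 0 := by
  have hf : l.filter (fun p => p.1 == w) = [] :=
    List.filter_eq_nil_iff.mpr (fun p hp => by simp [h p hp])
  simp [keyTotal, hf]

lemma keyTotal_all_eq {l : List (String × Int)} {w : String} (h : ∀ p ∈ l, p.1 = w) :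
    keyTotal l w = (l.map (fun p => p.2)).sum := by
  have hf : l.filter (fun p => p.1 == w) = l :=
    List.filter_eq_self.mpr (fun p hp => by simp [h p hp])
  simp [keyTotal, hf]

-- inserting with the (fst, snd)-lexicographic comparison keeps fst nondecreasing
lemma insertBy_lex_pairwise (x : String × Int) (ys : List (String × Int))
    (h : ys.Pairwise (fun a b => a.1 ≤ b.1)) :
    (PySem.List.insertBy
        (fun a b => decide (a.1 < b.1) || (!decide (b.1 < a.1) && decide (a.2 < b.2))) x
        ys).Pairwise (fun a b => a.1 ≤ b.1) := by
  induction ys with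
  | nil => simp [PySem.List.insertBy]
  | cons y ys ih =>
      rw [List.pairwise_cons] at h
      by_cases hb :
          (decide (x.1 < y.1) || (!decide (y.1 < x.1) && decide (x.2 < y.2))) = true
      · rw [PySem.List.insertBy, if_pos hb]
        have hxy : x.1 ≤ y.1 := by
          simp only [Bool.or_eq_true, Bool.and_eq_true, Bool.not_eq_eq_eq_not, Bool.not_true,
            decide_eq_true_eq, decide_eq_false_iff_not] at hb
          rcases hb with h1 | ⟨h1, _⟩
          · exact le_of_lt h1
          · exact le_of_not_gt h1
        refine List.pairwise_cons.mpr ⟨?_, List.pairwise_cons.mpr ⟨h.1, h.2⟩⟩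
        intro z hz
        rcases List.mem_cons.mp hz with rfl | hz'
        · exact hxy
        · exact le_trans hxy (h.1 z hz')
      · rw [PySem.List.insertBy, if_neg hb]
        have hyx : y.1 ≤ x.1 := by
          simp only [Bool.or_eq_true, Bool.and_eq_true, Bool.not_eq_eq_eq_not, Bool.not_true,
            decide_eq_true_eq, decide_eq_false_iff_not, not_or, not_and] at hb
          exact le_of_not_gt hb.1
        refine List.pairwise_cons.mpr ⟨?_, ih h.2⟩
        intro z hz
        rcases (PySem.List.insertBy_mem_iff _ _ _ _).mp hz with rfl | hz'
        · exact hyx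
        · exact h.1 z hz'

-- sorted2 with keys (fst, snd) is nondecreasing in fst
lemma sorted2_pairwise_fst (xs : List (String × Int)) :
    (PySem.List.sorted2 xs (fun p => p.1) (fun p => p.2)).Pairwise (fun a b => a.1 ≤ b.1) := by
  have aux : ∀ (l acc : List (String × Int)), acc.Pairwise (fun a b => a.1 ≤ b.1) →
      (l.foldl (fun acc x => PySem.List.insertBy
          (fun a b => decide (a.1 < b.1) || (!decide (b.1 < a.1) && decide (a.2 < b.2))) x acc)
        acc).Pairwise (fun a b => a.1 ≤ b.1) := by
    intro l
    induction l with
    | nil => intro acc h; simpa using h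
    | cons x l ih =>
        intro acc h
        exact ih _ (insertBy_lex_pairwise x acc h)
  exact aux xs [] (by simp)

-- after the first run of equal keys, every key is strictly larger
lemma drop_gt (x : String × Int) :
    ∀ (rest : List (String × Int)), (∀ y ∈ rest, x.1 ≤ y.1) →
      rest.Pairwise (fun a b => a.1 ≤ b.1) →
      ∀ p ∈ rest.dropWhile (fun p => p.1 == x.1), x.1 < p.1 := by
  intro rest
  induction rest with
  | nil => simp
  | cons y r ih =>
      intro hall hp
      rw [List.pairwise_cons] at hp
      by_cases hy : (y.1 == x.1) = true
      · rw [List.dropWhile_cons, if_pos hy]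
        exact ih (fun z hz => hall z (List.mem_cons_of_mem _ hz)) hp.2
      · rw [List.dropWhile_cons, if_neg hy]
        intro p hpmem
        have hne : y.1 ≠ x.1 := by simpa using hy
        have hxy : x.1 < y.1 :=
          lt_of_le_of_ne (hall y (List.mem_cons_self)) (Ne.symm hne)
        rcases List.mem_cons.mp hpmem with rfl | hpr
        · exact hxy
        · exact lt_of_lt_of_le hxy (hp.1 p hpr)

-- the groupby-and-sum pipeline on a fst-nondecreasing list: strictly increasing keys and
-- exactly the pairs (w, keyTotal ss w) for words w of ss
lemma groupSum_spec (n : Nat) (ss : List (String × Int)) (hn : ss.length ≤ n)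
    (h : ss.Pairwise (fun a b => a.1 ≤ b.1)) :
    ((pyGroupby ss).map (fun g => (g.1, (g.2.map (fun it => it.2)).sum))).Pairwise
        (fun a b => a.1 < b.1) ∧
    ∀ p : String × Int,
      p ∈ (pyGroupby ss).map (fun g => (g.1, (g.2.map (fun it => it.2)).sum)) ↔
        p.1 ∈ ss.map (fun q => q.1) ∧ p.2 = keyTotal ss p.1 := by
  induction n generalizing ss with
  | zero =>
      have : ss = [] := List.length_eq_zero_iff.mp (Nat.le_zero.mp hn)
      subst this
      constructor
      · simp [pyGroupby]
      · intro p; simp [pyGroupby]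
  | succ n ih =>
      cases ss with
      | nil =>
          constructor
          · simp [pyGroupby]
          · intro p; simp [pyGroupby]
      | cons x rest =>
          rw [List.pairwise_cons] at h
          obtain ⟨hx, hrest⟩ := h
          set t := rest.takeWhile (fun p => p.1 == x.1) with ht
          set d := rest.dropWhile (fun p => p.1 == x.1) with hd
          have hsplit : t ++ d = rest := List.takeWhile_append_dropWhile
          have F1 : ∀ p ∈ t, p.1 = x.1 := by
            intro p hp
            simpa using List.mem_takeWhile_imp hp
          have F2 : ∀ p ∈ d, x.1 < p.1 := drop_gt x rest hx hrest
          have F5 : d.Pairwise (fun a b => a.1 ≤ b.1) :=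
            List.Pairwise.sublist (List.dropWhile_sublist _) hrest
          have F6 : d.length ≤ n := by
            have hle := (List.dropWhile_sublist (l := rest) (p := fun p => p.1 == x.1)).length_le
            rw [← hd] at hle
            simp only [List.length_cons] at hn
            omega
          obtain ⟨hpd, hmemd⟩ := ih d F6 F5
          have hgb : pyGroupby (x :: rest) = (x.1, x :: t) :: pyGroupby d := by
            rw [pyGroupby]
          have F3 : keyTotal (x :: rest) x.1 = x.2 + (t.map (fun it => it.2)).sum := by
            rw [← hsplit, keyTotal_cons, keyTotal_append,
              keyTotal_all_eq F1, keyTotal_eq_zero (fun p hp => ne_of_gt (F2 p hp))]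
            simp
          have F4 : ∀ w, x.1 < w → keyTotal (x :: rest) w = keyTotal d w := by
            intro w hw
            rw [← hsplit, keyTotal_cons, keyTotal_append,
              keyTotal_eq_zero (fun p hp => by rw [F1 p hp]; exact ne_of_lt hw)]
            simp [ne_of_lt hw]
          have hdlt : ∀ q : String × Int,
              q ∈ (pyGroupby d).map (fun g => (g.1, (g.2.map (fun it => it.2)).sum)) →
                x.1 < q.1 := by
            intro q hq
            obtain ⟨hq1, _⟩ := (hmemd q).mp hq
            obtain ⟨r, hr, hr1⟩ := List.mem_map.mp hq1
            exact hr1 ▸ F2 r hr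
          constructor
          · rw [hgb]
            simp only [List.map_cons]
            refine List.pairwise_cons.mpr ⟨?_, hpd⟩
            intro q hq
            exact hdlt q hq
          · intro p
            have hdsub : ∀ w, w ∈ d.map (fun q : String × Int => q.1) →
                w ∈ rest.map (fun q : String × Int => q.1) := by
              intro w hw
              exact (List.Sublist.subset ((List.dropWhile_sublist _).map _)) hw
            have hrestsplit : ∀ w, w ≠ x.1 → w ∈ rest.map (fun q : String × Int => q.1) →
                w ∈ d.map (fun q : String × Int => q.1) := by
              intro w hne hw
              rw [← hsplit] at hw
              rcases List.mem_map.mp hw with ⟨r, hr, hr1⟩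
              rcases List.mem_append.mp hr with hrt | hrd
              · exact absurd (hr1 ▸ F1 r hrt) hne
              · exact List.mem_map.mpr ⟨r, hrd, hr1⟩
            rw [hgb]
            simp only [List.map_cons, List.mem_cons]
            constructor
            · rintro (rfl | hp)
              · refine ⟨Or.inl rfl, ?_⟩
                simp only [List.sum_cons]
                exact F3.symm
              · obtain ⟨hp1, hp2⟩ := (hmemd p).mp hp
                have hlt : x.1 < p.1 := hdlt p hp
                refine ⟨Or.inr (hdsub p.1 hp1), ?_⟩
                rw [F4 p.1 hlt]; exact hp2
            · rintro ⟨hp1, hp2⟩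
              by_cases hpx : p.1 = x.1
              · left
                have hps : p = (p.1, p.2) := rfl
                rw [hps, hp2, hpx, F3]
                simp
              · right
                have hpr : p.1 ∈ rest.map (fun q : String × Int => q.1) := by
                  rcases hp1 with h1 | h1
                  · exact absurd h1 hpx
                  · exact h1
                have hpd1 : p.1 ∈ d.map (fun q : String × Int => q.1) :=
                  hrestsplit p.1 hpx hpr
                have hlt : x.1 < p.1 := by
                  rcases List.mem_map.mp hpd1 with ⟨r, hr, hr1⟩
                  exact hr1 ▸ F2 r hr
                exact (hmemd p).mpr ⟨hpd1, by rw [← F4 p.1 hlt]; exact hp2⟩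

lemma canon_pairwise (xs : List (String × Int)) :
    (canon xs).Pairwise (fun a b => a.1 < b.1) := by
  unfold canon
  rw [List.pairwise_map]
  exact PySem.List.sorted_ofList_pairwise_lt _

lemma mem_canon (xs : List (String × Int)) (p : String × Int) :
    p ∈ canon xs ↔ p.1 ∈ xs.map (fun q => q.1) ∧ p.2 = keyTotal xs p.1 := by
  unfold canon
  constructor
  · intro hp
    obtain ⟨w, hw, hw1⟩ := List.mem_map.mp hp
    have hw' : w ∈ xs.map (fun q => q.1) := by
      have := (PySem.List.mem_sorted _ _ _ _).mp hw
      exact (PySem.Set.mem_ofList _ _).mp this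
    constructor
    · rw [← hw1]; exact hw'
    · rw [← hw1]
  · rintro ⟨hp1, hp2⟩
    refine List.mem_map.mpr ⟨p.1, ?_, ?_⟩
    · exact (PySem.List.mem_sorted _ _ _ _).mpr ((PySem.Set.mem_ofList _ _).mpr hp1)
    · rw [← hp2]

lemma pairwise_lt_nodup (l : List (String × Int)) (h : l.Pairwise (fun a b => a.1 < b.1)) :
    l.Nodup := by
  exact h.imp (fun hab => by intro he; subst he; exact lt_irrefl _ hab)

lemma portA_eq_canon (xs : List (String × Int)) :
    (pyGroupby (PySem.List.sorted2 xs (fun p => p.1) (fun p => p.2))).map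
        (fun g => (g.1, (g.2.map (fun it => it.2)).sum)) = canon xs := by
  set ss := PySem.List.sorted2 xs (fun p => p.1) (fun p => p.2) with hss
  have hperm : ss.Perm xs := PySem.List.sorted2_perm _ _ _ _
  obtain ⟨hpair, hmem⟩ := groupSum_spec ss.length ss le_rfl (sorted2_pairwise_fst xs)
  refine PySem.List.eq_of_perm_of_pairwise_le_of_pairwise_lt (fun p : String × Int => p.1)
    ?_ (hpair.imp le_of_lt) (canon_pairwise xs)
  rw [List.perm_ext_iff_of_nodup (pairwise_lt_nodup _ hpair)
    (pairwise_lt_nodup _ (canon_pairwise xs))]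
  intro p
  rw [hmem p, mem_canon]
  constructor
  · rintro ⟨h1, h2⟩
    exact ⟨(hperm.map _).mem_iff.mp h1, by rw [h2, keyTotal_perm hperm]⟩
  · rintro ⟨h1, h2⟩
    exact ⟨(hperm.map _).mem_iff.mpr h1, by rw [h2, keyTotal_perm hperm]⟩

-- B-side: the aggregation dict's lookup is keyTotal
lemma getD_agg (l : List (String × Int)) (d : PySem.Dict String Int) (c : String) :
    (l.foldl (fun d wc => d.modify wc.1 0 (fun v => v + wc.2)) d).getD c 0 =
      d.getD c 0 + keyTotal l c := by
  induction l generalizing d with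
  | nil => simp [keyTotal]
  | cons p l ih =>
      rw [List.foldl_cons, ih, PySem.Dict.getD_modify, keyTotal_cons]
      by_cases h : c = p.1
      · rw [if_pos h, if_pos h.symm, h]; ring
      · rw [if_neg h, if_neg (fun e => h e.symm)]; ring

lemma portB_eq_canon (xs : List (String × Int)) :
    PySem.List.sorted2
        (xs.foldl (fun d wc => d.modify wc.1 0 (fun v => v + wc.2))
          (PySem.Dict.empty : PySem.Dict String Int)).items (fun p => p.1) (fun p => p.2) =
      canon xs := by
  set D := xs.foldl (fun d wc => d.modify wc.1 0 (fun v => v + wc.2))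
    (PySem.Dict.empty : PySem.Dict String Int) with hD
  have hkeys : D.keys = PySem.Set.update (PySem.Dict.empty : PySem.Dict String Int).keys
      (xs.map (fun p => p.1)) := by
    simpa using PySem.Dict.keys_foldl_modify_key xs (fun p : String × Int => p.1) 0
      (fun _ p => (fun v => v + p.2)) PySem.Dict.empty
  have hkeymem : ∀ w, w ∈ D.keys ↔ w ∈ xs.map (fun p => p.1) := by
    intro w
    rw [hkeys, PySem.Set.mem_update]
    simp [PySem.Dict.empty, PySem.Dict.keys]
  have hkeynodup : D.keys.Nodup := by
    refine PySem.Dict.nodup_keys_foldl_modify_key xs (fun p : String × Int => p.1) 0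
      (fun _ p => (fun v => v + p.2)) PySem.Dict.empty ?_
    simp [PySem.Dict.empty, PySem.Dict.keys]
  have hget : ∀ c, D.getD c 0 = keyTotal xs c := by
    intro c
    rw [hD, getD_agg]
    simp [PySem.Dict.empty, PySem.Dict.getD, PySem.Dict.get?]
  have hitems : D.items = D.keys.map (fun k => (k, keyTotal xs k)) := by
    rw [PySem.Dict.items_eq_map_keys D hkeynodup 0]
    exact List.map_congr_left (fun k _ => by rw [hget k])
  have hws :=
    PySem.List.sorted_ofList_pairwise_lt (xs := xs.map (fun p : String × Int => p.1))
  have hwsnodup : (PySem.List.sorted (PySem.Set.ofList (xs.map (fun p : String × Int => p.1)))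
      (fun w => w)).Nodup := hws.imp (fun hab => by intro he; subst he; exact lt_irrefl _ hab)
  have hkperm : D.keys.Perm (PySem.List.sorted
      (PySem.Set.ofList (xs.map (fun p : String × Int => p.1))) (fun w => w)) := by
    rw [List.perm_ext_iff_of_nodup hkeynodup hwsnodup]
    intro w
    rw [hkeymem w, PySem.List.mem_sorted, PySem.Set.mem_ofList]
  have hitemsperm : D.items.Perm (canon xs) := by
    rw [hitems]
    unfold canon
    exact hkperm.map _
  refine PySem.List.eq_of_perm_of_pairwise_le_of_pairwise_lt (fun p : String × Int => p.1)
    ?_ ((sorted2_pairwise_fst D.items).imp id) (canon_pairwise xs)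
  exact (PySem.List.sorted2_perm _ _ _ _).trans hitemsperm

-- ===== VERDICT (by name: the statement is the Claim_ definition above) =====
theorem global_wordcount_spec : Claim_equal_global_wordcount := by
  intro wordcounts _
  show global_wordcount wordcounts = global_wordcount_alt wordcounts
  unfold global_wordcount global_wordcount_alt
  rw [chained_eq_flatten, portA_eq_canon]
  rw [show wordcounts.foldl
      (fun d article => article.foldl (fun d wc => d.modify wc.1 0 (fun v => v + wc.2)) d)
      (PySem.Dict.empty : PySem.Dict String Int) =
    wordcounts.flatten.foldl (fun d wc => d.modify wc.1 0 (fun v => v + wc.2))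
      (PySem.Dict.empty : PySem.Dict String Int) from (List.foldl_flatten).symm]
  rw [portB_eq_canon]
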